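-- pv_equiv track=rewrite | github.com/KramStyles/Algorithms | algo.py | reduce_directions
-- ===== SOURCE A (Python) =====
-- def reduce_directions(directions: list) -> list:
--
--     """
--     We are given directions to go from one point to another. The directions are "NORTH", "SOUTH", "WEST", "EAST". Clearly "NORTH" and "SOUTH" are opposite, "WEST" and "EAST" too. Going one direction and coming back the opposite direction is a wasted effort, so let's concise these directions to go the shortest route.
--
--     For example, given the following directions:
--
--     plan = ["NORTH", "SOUTH", "SOUTH", "EAST", "WEST", "NORTH", "WEST"]
--
--     You can immediately see that going "NORTH" and then "SOUTH" is not reasonable, better stay to the same place!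
--     So the task is to reduce a simplified version of the plan. A better plan in this case is simply:
--
--     plan = ["WEST"]
--
--     Other examples:
--     In ["NORTH", "SOUTH", "EAST", "WEST"], the direction "NORTH" + "SOUTH" is going north and coming back right away. What a waste of time! Better to do nothing. The path becomes ["EAST", "WEST"], now "EAST" and "WEST" annihilate each other, therefore, the final result is [] (nil in Clojure).
--     In ["NORTH", "EAST", "WEST", "SOUTH", "WEST", "WEST"], "NORTH" and "SOUTH" are not directly opposite but they become directly opposite after the reduction of "EAST" and "WEST" so the whole path is reducible to ["WEST", "WEST"].
--     """
--     opposites = {"NORTH": "SOUTH", "SOUTH": "NORTH", "EAST": "WEST", "WEST": "EAST"}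
--
--     holder = directions[:]
--
--     shorten = []
--     for index, dir in enumerate(directions):
--         # (shorten.pop()) if shorten and shorten[-1] == opposites[dir] else shorten.append(dir)
--         if shorten and shorten[-1] == opposites[dir]:
--             shorten.pop()
--         else:
--             shorten.append(dir)
--     return shorten
-- ===== SOURCE B (Python) =====
-- def reduce_directions(directions: list) -> list:
--     """Reduce the plan by repeatedly deleting the first adjacent opposite pair
--     until a full scan finds none (fixpoint), instead of a single stack pass."""
--     opposites = {"NORTH": "SOUTH", "SOUTH": "NORTH", "EAST": "WEST", "WEST": "EAST"}
--     current = list(directions)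
--     changed = True
--     while changed:
--         changed = False
--         for i in range(len(current) - 1):
--             if opposites.get(current[i]) == current[i + 1]:
--                 del current[i:i + 2]
--                 changed = True
--                 break
--     return current
-- ===== Notes on version B (the rewrite author's own statement) =====
-- stated objective: alternative
-- what changed: Replaces the single left-to-right stack pass with repeated whole-list scans that delete the first adjacent opposite pair until a fixpoint is reached (confluent cancellation).
-- outside the precondition, e.g. on reduce_directions(['NORTH', 'SOUTH', 'FOO']): A returns ['FOO'], B returns ['FOO']
import Mathlib
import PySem

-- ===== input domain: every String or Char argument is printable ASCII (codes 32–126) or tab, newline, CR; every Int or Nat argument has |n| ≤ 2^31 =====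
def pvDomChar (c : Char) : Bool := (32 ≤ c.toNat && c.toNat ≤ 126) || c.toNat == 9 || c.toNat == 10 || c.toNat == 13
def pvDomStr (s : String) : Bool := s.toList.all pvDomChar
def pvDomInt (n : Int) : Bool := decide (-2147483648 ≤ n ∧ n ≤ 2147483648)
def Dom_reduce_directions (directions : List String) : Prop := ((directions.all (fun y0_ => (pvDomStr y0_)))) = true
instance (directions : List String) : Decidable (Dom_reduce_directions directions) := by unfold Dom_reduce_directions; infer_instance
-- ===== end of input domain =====

-- B replaces A's single stack pass by repeated deletion of the first adjacent opposite
-- pair until a fixpoint (same reduced list; not faster — an alternative decomposition).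


-- the literal dict "opposites" both Pythons build
def pvOpposites : PySem.Dict String String :=
  PySem.Dict.ofList [("NORTH", "SOUTH"), ("SOUTH", "NORTH"), ("EAST", "WEST"), ("WEST", "EAST")]

-- ===== PORT A =====
-- A: one left-to-right pass over `directions` keeping a stack `shorten`.
-- `opposites[dir]` (KeyError on a missing key, excluded by Pre_) is ported as getD with
-- an unused default; `shorten.pop()` discards the returned element, so only dropLast remains.
def reduce_directions (directions : List String) : List String :=
  directions.foldl
    (fun shorten dir =>
      if shorten ≠ [] ∧ PySem.List.pyGet? shorten (-1) = some (PySem.Dict.getD pvOpposites dir "") then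
        shorten.dropLast
      else
        shorten ++ [dir])
    []

-- ===== PORT B =====
-- Source B's inner for-loop: find the first adjacent pair (x, y) with opposites.get(x) == y
-- and delete both (some = changed; none = a full scan found nothing).
def pvRemoveFirstPair : List String → Option (List String)
  | [] => none
  | [_] => none
  | x :: y :: rest =>
    if PySem.Dict.get? pvOpposites x = some y then some rest
    else (pvRemoveFirstPair (y :: rest)).map (x :: ·)

theorem pvRemoveFirstPair_length {cur next : List String}
    (h : pvRemoveFirstPair cur = some next) : next.length < cur.length := by
  induction cur generalizing next with
  | nil => simp [pvRemoveFirstPair] at h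
  | cons x t ih =>
    cases t with
    | nil => simp [pvRemoveFirstPair] at h
    | cons y rest =>
      simp only [pvRemoveFirstPair] at h
      split at h
      · cases h; simp
      · rcases Option.map_eq_some_iff.mp h with ⟨l', hl', rfl⟩
        have := ih hl'
        simp at this ⊢; omega

-- Source B's while-loop: repeat until a scan removes nothing.
def pvReduceFix (cur : List String) : List String :=
  match _h : pvRemoveFirstPair cur with
  | some next => pvReduceFix next
  | none => cur
termination_by cur.length
decreasing_by exact pvRemoveFirstPair_length _h

def reduce_directions_alt (directions : List String) : List String :=
  pvReduceFix directions

-- ===== PRECONDITION & SPEC =====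
-- Pre_ admits any list of length ≤ 1 (A never evaluates opposites[dir] there) and otherwise
-- requires every element to be one of the four directions. A raises KeyError on an invalid
-- element only when its stack is momentarily non-empty, a run-state condition with no closed
-- form, so Pre_ conservatively excludes longer lists containing an invalid element, including
-- some on which A still returns (an invalid element sitting after a fully cancelled prefix) —
-- B returns the same value there too (see the cite).
def Pre_reduce_directions (directions : List String) : Prop :=
  directions.length ≤ 1 ∨ ∀ d ∈ directions, d = "NORTH" ∨ d = "SOUTH" ∨ d = "EAST" ∨ d = "WEST"
instance (directions : List String) : Decidable (Pre_reduce_directions directions) := by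
  unfold Pre_reduce_directions; infer_instance

def pvWitness_reduce_directions : List String := ["NORTH", "SOUTH", "SOUTH", "EAST", "WEST", "NORTH", "WEST"]

def Spec_reduce_directions (directions : List String) (out : List String) : Prop := out = reduce_directions_alt directions
instance (directions : List String) (out : List String) : Decidable (Spec_reduce_directions directions out) := by unfold Spec_reduce_directions; infer_instance

-- ===== CLAIM (what is proved, stated in full; the proofs are below) =====
def Claim_equal_reduce_directions : Prop := ∀ (directions : List String), Dom_reduce_directions directions → Pre_reduce_directions directions → Spec_reduce_directions directions (reduce_directions directions)

-- ===== LEMMAS AND PROOFS =====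

-- the value opposites[d] for a valid d
def pvOpp (d : String) : String :=
  if d = "NORTH" then "SOUTH" else if d = "SOUTH" then "NORTH"
  else if d = "EAST" then "WEST" else "EAST"

theorem pvGet_valid {d : String}
    (h : d = "NORTH" ∨ d = "SOUTH" ∨ d = "EAST" ∨ d = "WEST") :
    PySem.Dict.get? pvOpposites d = some (pvOpp d) := by
  rcases h with rfl | rfl | rfl | rfl <;> decide

theorem pvGetD_valid {d : String}
    (h : d = "NORTH" ∨ d = "SOUTH" ∨ d = "EAST" ∨ d = "WEST") :
    PySem.Dict.getD pvOpposites d "" = pvOpp d := by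
  rcases h with rfl | rfl | rfl | rfl <;> decide

theorem pvOpp_eq_iff {x d : String}
    (hx : x = "NORTH" ∨ x = "SOUTH" ∨ x = "EAST" ∨ x = "WEST")
    (hd : d = "NORTH" ∨ d = "SOUTH" ∨ d = "EAST" ∨ d = "WEST") :
    x = pvOpp d ↔ pvOpp x = d := by
  rcases hx with rfl | rfl | rfl | rfl <;> rcases hd with rfl | rfl | rfl | rfl <;> decide

-- a list is irreducible iff a full scan removes nothing
theorem pvIrred_dropLast {s : List String} (h : pvRemoveFirstPair s = none) :
    pvRemoveFirstPair s.dropLast = none := by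
  induction s with
  | nil => simp [pvRemoveFirstPair]
  | cons x t ih =>
    cases t with
    | nil => simp [pvRemoveFirstPair]
    | cons y rest =>
      simp only [pvRemoveFirstPair] at h
      split at h
      · exact absurd h (by simp)
      · have htail : pvRemoveFirstPair (y :: rest) = none := by
          simpa using h
        cases rest with
        | nil => simp [pvRemoveFirstPair]
        | cons z rest' =>
          have h1 : (x :: y :: z :: rest').dropLast = x :: y :: (z :: rest').dropLast := by simp
          rw [h1]
          have ht := ih htail
          have h2 : (y :: z :: rest').dropLast = y :: (z :: rest').dropLast := by simp
          rw [h2] at ht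
          simp only [pvRemoveFirstPair]
          rw [if_neg (by assumption)]
          simp [ht]

theorem pvIrred_snoc {s : List String} {d : String}
    (h : pvRemoveFirstPair s = none)
    (hlast : ∀ x, s.getLast? = some x → PySem.Dict.get? pvOpposites x ≠ some d) :
    pvRemoveFirstPair (s ++ [d]) = none := by
  induction s with
  | nil => simp [pvRemoveFirstPair]
  | cons x t ih =>
    cases t with
    | nil =>
      have hx := hlast x (by simp)
      simp [pvRemoveFirstPair, hx]
    | cons y rest =>
      simp only [pvRemoveFirstPair] at h
      split at h
      · exact absurd h (by simp)
      · have htail : pvRemoveFirstPair (y :: rest) = none := by simpa using h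
        have ht := ih htail (fun z hz => hlast z (by simpa using hz))
        simp only [List.cons_append, pvRemoveFirstPair]
        rw [if_neg (by assumption)]
        simpa using ht

theorem pvRemove_boundary {s : List String} {x d : String} (l : List String)
    (h : pvRemoveFirstPair s = none)
    (hlast : s.getLast? = some x)
    (hx : PySem.Dict.get? pvOpposites x = some d) :
    pvRemoveFirstPair (s ++ d :: l) = some (s.dropLast ++ l) := by
  induction s with
  | nil => simp at hlast
  | cons a t ih =>
    cases t with
    | nil =>
      simp at hlast; subst hlast
      simp [pvRemoveFirstPair, hx]
    | cons y rest =>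
      simp only [pvRemoveFirstPair] at h
      split at h
      · exact absurd h (by simp)
      · have htail : pvRemoveFirstPair (y :: rest) = none := by simpa using h
        have hl : (y :: rest).getLast? = some x := by
          simpa [List.getLast?_cons_cons] using hlast
        have ht := ih htail hl
        simp only [List.cons_append, pvRemoveFirstPair]
        rw [if_neg (by assumption)]
        rw [List.cons_append] at ht
        simp [ht]

theorem pvReduceFix_none {s : List String} (h : pvRemoveFirstPair s = none) :
    pvReduceFix s = s := by
  rw [pvReduceFix.eq_def]
  split
  · rename_i t ht; rw [h] at ht; cases ht
  · rfl

theorem pvReduceFix_some {s t : List String} (h : pvRemoveFirstPair s = some t) :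
    pvReduceFix s = pvReduceFix t := by
  rw [pvReduceFix.eq_def]
  split
  · rename_i u hu; rw [h] at hu; cases hu; rfl
  · rename_i hn; rw [h] at hn; cases hn

-- the main invariant: with an irreducible, all-valid stack s, B's fixpoint on s ++ l
-- computes exactly A's fold over l started at s
theorem pvMain (l : List String) : ∀ (s : List String),
    pvRemoveFirstPair s = none →
    (∀ x ∈ s, x = "NORTH" ∨ x = "SOUTH" ∨ x = "EAST" ∨ x = "WEST") →
    (∀ x ∈ l, x = "NORTH" ∨ x = "SOUTH" ∨ x = "EAST" ∨ x = "WEST") →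
    pvReduceFix (s ++ l) =
      l.foldl (fun shorten dir =>
        if shorten ≠ [] ∧ PySem.List.pyGet? shorten (-1) = some (PySem.Dict.getD pvOpposites dir "") then
          shorten.dropLast
        else shorten ++ [dir]) s := by
  induction l with
  | nil =>
    intro s hs _ _
    simpa using pvReduceFix_none hs
  | cons d ds ih =>
    intro s hs hsv hlv
    have hd := hlv d (by simp)
    have hdsv : ∀ x ∈ ds, x = "NORTH" ∨ x = "SOUTH" ∨ x = "EAST" ∨ x = "WEST" :=
      fun x hx => hlv x (by simp [hx])
    simp only [List.foldl_cons]
    rw [PySem.List.pyGet?_neg_one, pvGetD_valid hd]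
    by_cases hc : s ≠ [] ∧ s.getLast? = some (pvOpp d)
    · rw [if_pos hc]
      obtain ⟨hne, hlast⟩ := hc
      obtain ⟨x, hx⟩ : ∃ x, s.getLast? = some x := ⟨pvOpp d, hlast⟩
      have hxv := hsv x (List.mem_of_getLast? hx)
      have hxeq : x = pvOpp d := by rw [hx] at hlast; exact Option.some_injective _ hlast
      have hgx : PySem.Dict.get? pvOpposites x = some d := by
        rw [pvGet_valid hxv, (pvOpp_eq_iff hxv hd).mp hxeq]
      rw [pvReduceFix_some (pvRemove_boundary ds hs hx hgx)]
      exact ih s.dropLast (pvIrred_dropLast hs)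
        (fun z hz => hsv z ((List.dropLast_sublist _).subset hz)) hdsv
    · rw [if_neg hc]
      have hirr : pvRemoveFirstPair (s ++ [d]) = none := by
        refine pvIrred_snoc hs (fun x hx hgx => ?_)
        rw [pvGet_valid (hsv x (List.mem_of_getLast? hx))] at hgx
        have : pvOpp x = d := Option.some_injective _ hgx
        exact hc ⟨by rintro rfl; simp at hx,
          by rw [hx, (pvOpp_eq_iff (hsv x (List.mem_of_getLast? hx)) hd).mpr this]⟩
      have : s ++ d :: ds = (s ++ [d]) ++ ds := by simp
      rw [this]
      exact ih (s ++ [d]) hirr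
        (fun z hz => by rcases List.mem_append.mp hz with h | h
                        · exact hsv z h
                        · simp at h; subst h; exact hd) hdsv

-- ===== VERDICT (by name: the statement is the Claim_ definition above) =====
theorem reduce_directions_spec : Claim_equal_reduce_directions := by
  intro directions _ hpre
  unfold Spec_reduce_directions reduce_directions reduce_directions_alt
  rcases hpre with hlen | hval
  · cases directions with
    | nil => simp [pvReduceFix_none (show pvRemoveFirstPair [] = none from rfl)]
    | cons x t =>
      cases t with
      | nil => simp [pvReduceFix_none (show pvRemoveFirstPair [x] = none from rfl)]
      | cons y t' => simp at hlen
  · have := pvMain directions [] (by simp [pvRemoveFirstPair]) (by simp) hval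
    simpa using this.symm
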